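-- pv_equiv track=rewrite | github.com/haoxiang-xu/PuPu | unchain_runtime/server/unchain_adapter.py | _filter_tools_to_manifest
-- ===== SOURCE A (Python) =====
-- from typing import Any, Dict, Iterable, List
--
-- def _filter_tools_to_manifest(
--     tools: List[Dict[str, str]],
--     manifest_tool_names: List[str],
-- ) -> List[Dict[str, str]]:
--     if not manifest_tool_names:
--         return tools
--     tools_by_name: Dict[str, Dict[str, str]] = {}
--     for tool in tools:
--         name = str(tool.get("name", "")).strip()
--         if name and name not in tools_by_name:
--             tools_by_name[name] = tool
--     return [tools_by_name[name] for name in manifest_tool_names if name in tools_by_name]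
-- ===== SOURCE B (Python) =====
-- from typing import Dict, List
--
--
-- def _filter_tools_to_manifest(
--     tools: List[Dict[str, str]],
--     manifest_tool_names: List[str],
-- ) -> List[Dict[str, str]]:
--     if not manifest_tool_names:
--         return tools
--     # One pass over tools: fill a slot array indexed by manifest position.
--     # A slot is filled at most once, so each position keeps the FIRST tool
--     # (in tools order) whose stripped name equals that manifest name.
--     slots: List[Dict[str, str]] = [None] * len(manifest_tool_names)
--     for tool in tools:
--         name = str(tool.get("name", "")).strip()
--         if not name:
--             continue
--         for i, wanted in enumerate(manifest_tool_names):
--             if slots[i] is None and wanted == name: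
--                 slots[i] = tool
--     return [t for t in slots if t is not None]
-- ===== Notes on version B (the rewrite author's own statement) =====
-- stated objective: alternative
-- what changed: B inverts the traversal: instead of A's name-indexed dict built from tools and then looked up per manifest name, B makes a single pass over tools, filling a slot array indexed by manifest position (a slot is filled at most once, so each position keeps the first matching tool), and finally drops the unfilled slots.
import Mathlib
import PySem

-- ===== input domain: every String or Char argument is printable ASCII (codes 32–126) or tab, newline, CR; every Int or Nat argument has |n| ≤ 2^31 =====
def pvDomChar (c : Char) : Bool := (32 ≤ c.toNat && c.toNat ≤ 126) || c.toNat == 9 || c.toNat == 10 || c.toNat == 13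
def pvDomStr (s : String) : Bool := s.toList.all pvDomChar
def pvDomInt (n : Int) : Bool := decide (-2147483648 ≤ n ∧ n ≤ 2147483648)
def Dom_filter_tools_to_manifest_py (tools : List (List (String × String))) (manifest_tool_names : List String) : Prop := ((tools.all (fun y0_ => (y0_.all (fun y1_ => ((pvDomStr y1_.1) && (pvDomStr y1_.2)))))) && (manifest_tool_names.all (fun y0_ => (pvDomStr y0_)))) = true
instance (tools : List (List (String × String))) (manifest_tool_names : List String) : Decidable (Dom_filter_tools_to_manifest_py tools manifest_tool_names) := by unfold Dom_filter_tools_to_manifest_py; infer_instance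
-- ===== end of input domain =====

-- B inverts A's traversal: one pass over tools fills a slot array indexed by manifest
-- position (each slot filled at most once, so it keeps the first matching tool);
-- unfilled slots are dropped at the end. No name-indexed dict is built.

-- ===== PORT A =====
-- name = str(tool.get("name", "")).strip()
def pvNameA (tool : List (String × String)) : String :=
  PySem.Str.strip (PySem.Dict.getD (PySem.Dict.mk tool) "name" "")

def filter_tools_to_manifest_py (tools : List (List (String × String))) (manifest_tool_names : List String) : List (List (String × String)) :=
  if manifest_tool_names = [] then tools
  else
    let tools_by_name : PySem.Dict String (List (String × String)) :=
      tools.foldl (fun d tool =>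
        let name := pvNameA tool
        if name ≠ "" ∧ d.contains name = false then d.insert name tool else d)
        PySem.Dict.empty
    manifest_tool_names.filterMap (fun name => tools_by_name.get? name)

-- ===== PORT B =====
-- the inner `for i, wanted in enumerate(manifest_tool_names)` loop: the slot array is
-- carried zipped with its manifest name, `(wanted, slots[i])`
def filter_tools_to_manifest_py_alt (tools : List (List (String × String))) (manifest_tool_names : List String) : List (List (String × String)) :=
  if manifest_tool_names = [] then tools
  else
    let slots := tools.foldl (fun slots tool =>
        let name := pvNameA tool
        if name = "" then slots
        else slots.map (fun p =>
          (p.1, if p.2 = none ∧ p.1 = name then some tool else p.2)))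
      (manifest_tool_names.map (fun n => (n, (none : Option (List (String × String))))))
    slots.filterMap (fun p => p.2)

-- ===== PRECONDITION & SPEC =====
def Spec_filter_tools_to_manifest_py (tools : List (List (String × String))) (manifest_tool_names : List String) (out : List (List (String × String))) : Prop := out = filter_tools_to_manifest_py_alt tools manifest_tool_names
instance (tools : List (List (String × String))) (manifest_tool_names : List String) (out : List (List (String × String))) : Decidable (Spec_filter_tools_to_manifest_py tools manifest_tool_names out) := by unfold Spec_filter_tools_to_manifest_py; infer_instance

-- ===== CLAIM (what is proved, stated in full; the proofs are below) =====
def Claim_equal_filter_tools_to_manifest_py : Prop := ∀ (tools : List (List (String × String))) (manifest_tool_names : List String), Dom_filter_tools_to_manifest_py tools manifest_tool_names → Spec_filter_tools_to_manifest_py tools manifest_tool_names (filter_tools_to_manifest_py tools manifest_tool_names)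

-- ===== LEMMAS AND PROOFS =====

-- first tool (in tools order) whose stripped name equals `n` (proof-side notion
-- both programs are reduced to)
def pvFirstMatch (tools : List (List (String × String))) (n : String) : Option (List (String × String)) :=
  match tools with
  | [] => none
  | tool :: rest => if pvNameA tool = n then some tool else pvFirstMatch rest n

-- the evolution of ONE slot of B's array across the pass over tools
def pvEntry (tools : List (List (String × String))) (n : String) (s : Option (List (String × String))) : Option (List (String × String)) :=
  match tools with
  | [] => s
  | tool :: rest =>
      pvEntry rest n (if pvNameA tool ≠ "" ∧ s = none ∧ n = pvNameA tool then some tool else s)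

-- ---- A side ----

def pvStepA (d : PySem.Dict String (List (String × String))) (tool : List (String × String)) : PySem.Dict String (List (String × String)) :=
  let name := pvNameA tool
  if name ≠ "" ∧ d.contains name = false then d.insert name tool else d

-- the key "" is never inserted
lemma get_empty_key (tools : List (List (String × String))) (d : PySem.Dict String (List (String × String))) :
    (tools.foldl pvStepA d).get? "" = d.get? "" := by
  induction tools generalizing d with
  | nil => rfl
  | cons t rest ih =>
      simp only [List.foldl_cons, pvStepA]
      split_ifs with h
      · rw [ih, PySem.Dict.get?_insert_of_ne]
        exact fun he => h.1 he.symm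
      · exact ih d

-- lookup in A's first-wins dict = first matching tool
lemma get_foldl_eq (tools : List (List (String × String))) (d : PySem.Dict String (List (String × String))) (n : String) (hn : n ≠ "") :
    (tools.foldl pvStepA d).get? n = (d.get? n).or (pvFirstMatch tools n) := by
  induction tools generalizing d with
  | nil => cases h : d.get? n <;> simp [pvFirstMatch, Option.or, h]
  | cons t rest ih =>
      rw [List.foldl_cons, ih,
        show pvFirstMatch (t :: rest) n = if pvNameA t = n then some t else pvFirstMatch rest n from rfl]
      unfold pvStepA
      by_cases he : pvNameA t = n
      · rw [if_pos he]
        by_cases h : pvNameA t ≠ "" ∧ d.contains (pvNameA t) = false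
        · rw [if_pos h, he, PySem.Dict.get?_insert_self]
          have hd : d.get? n = none := by
            have h2 := h.2
            rw [he, PySem.Dict.contains_eq_isSome_get?] at h2
            cases hg : d.get? n with
            | none => rfl
            | some v => rw [hg] at h2; simp at h2
          rw [hd]
          cases pvFirstMatch rest n <;> simp [Option.or]
        · have hc : d.contains (pvNameA t) = true := by
            cases hcc : d.contains (pvNameA t) with
            | false => exact absurd ⟨fun hh => hn (he ▸ hh), hcc⟩ h
            | true => rfl
          rw [if_neg h]
          rw [PySem.Dict.contains_eq_isSome_get?] at hc
          cases hg : d.get? (pvNameA t) with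
          | none => rw [hg] at hc; simp at hc
          | some v => rw [he] at hg; rw [hg]; simp [Option.or]
      · rw [if_neg he]
        by_cases h : pvNameA t ≠ "" ∧ d.contains (pvNameA t) = false
        · rw [if_pos h, PySem.Dict.get?_insert_of_ne d t (Ne.symm he)]
        · rw [if_neg h]

-- ---- B side ----

-- B's fold acts independently on each slot
lemma foldl_stepB (tools : List (List (String × String))) (st : List (String × Option (List (String × String)))) :
    tools.foldl (fun slots tool =>
        let name := pvNameA tool
        if name = "" then slots
        else slots.map (fun p =>
          (p.1, if p.2 = none ∧ p.1 = name then some tool else p.2))) st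
    = st.map (fun p => (p.1, pvEntry tools p.1 p.2)) := by
  induction tools generalizing st with
  | nil => simp [pvEntry]
  | cons t rest ih =>
      simp only [List.foldl_cons]
      by_cases h : pvNameA t = ""
      · simp only [h]
        rw [if_pos trivial, ih st]
        apply List.map_congr_left
        intro p _
        have he : pvEntry (t :: rest) p.1 p.2
            = pvEntry rest p.1 (if pvNameA t ≠ "" ∧ p.2 = none ∧ p.1 = pvNameA t then some t else p.2) := rfl
        rw [he, if_neg (by rintro ⟨h1, _, _⟩; exact h1 h)]
      · simp only [if_neg h]
        rw [ih, List.map_map]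
        apply List.map_congr_left
        intro p _
        simp only [Function.comp]
        have he : pvEntry (t :: rest) p.1 p.2
            = pvEntry rest p.1 (if pvNameA t ≠ "" ∧ p.2 = none ∧ p.1 = pvNameA t then some t else p.2) := rfl
        rw [he]
        congr 1
        by_cases hc : p.2 = none ∧ p.1 = pvNameA t
        · rw [if_pos hc, if_pos ⟨h, hc.1, hc.2⟩]
        · rw [if_neg hc, if_neg (fun ⟨_, h2, h3⟩ => hc ⟨h2, h3⟩)]

lemma entry_some (tools : List (List (String × String))) (n : String) (v : List (String × String)) :
    pvEntry tools n (some v) = some v := by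
  induction tools with
  | nil => rfl
  | cons t rest ih => simp [pvEntry, ih]

lemma entry_none (tools : List (List (String × String))) (n : String) :
    pvEntry tools n none = if n = "" then none else pvFirstMatch tools n := by
  induction tools with
  | nil => simp [pvEntry, pvFirstMatch]
  | cons t rest ih =>
      by_cases hn : n = ""
      · subst hn
        simp only [] at ih ⊢
        unfold pvEntry
        have : ¬ (pvNameA t ≠ "" ∧ (none : Option (List (String × String))) = none ∧ "" = pvNameA t) := by
          rintro ⟨h1, _, h3⟩; exact h1 h3.symm
        rw [if_neg this, ih]
        simp
      · simp only [if_neg hn] at *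
        unfold pvEntry pvFirstMatch
        by_cases he : pvNameA t = n
        · have hne : pvNameA t ≠ "" := by
            show pvNameA t ≠ ""
            rw [he]; exact hn
          rw [if_pos ⟨hne, rfl, he.symm⟩, if_pos he, entry_some]
        · rw [if_neg (fun ⟨_, _, h3⟩ => he h3.symm), if_neg he, ih]

-- ===== VERDICT (by name: the statement is the Claim_ definition above) =====
theorem filter_tools_to_manifest_py_spec : Claim_equal_filter_tools_to_manifest_py := by
  intro tools names _
  unfold Spec_filter_tools_to_manifest_py filter_tools_to_manifest_py filter_tools_to_manifest_py_alt
  split_ifs with h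
  · rfl
  · rw [foldl_stepB, List.map_map, List.filterMap_map]
    rw [show (fun d tool => let name := pvNameA tool;
          if name ≠ "" ∧ d.contains name = false then d.insert name tool else d) = pvStepA from rfl]
    apply List.filterMap_congr
    intro n _
    simp only [Function.comp]
    rw [entry_none]
    by_cases hn : n = ""
    · subst hn
      simp [get_empty_key tools PySem.Dict.empty, PySem.Dict.get?_empty]
    · rw [if_neg hn, get_foldl_eq tools PySem.Dict.empty n hn]
      simp [PySem.Dict.get?_empty, Option.or]
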